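-- pv_equiv track=rewrite | github.com/funcn-ai/funcn | src/funcn_cli/templates/funcn_md_template.py | _clean_markdown_spacing
-- ===== SOURCE A (Python) =====
-- def _clean_markdown_spacing(content: str) -> str:
--     """
--     Clean up markdown spacing issues to fix linting problems.
--
--     Fixes:
--     - MD032: Ensures blank lines around lists
--     - MD012: Removes multiple consecutive blank lines
--     """
--     lines = content.split('\n')
--     cleaned_lines = []
--
--     for i, line in enumerate(lines):
--         # Check if current line is a list item
--         is_list_item = line.strip().startswith('- ') or line.strip().startswith('* ')
--
--         # Check if previous line exists and is not a list item
--         prev_line = lines[i - 1] if i > 0 else ""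
--         prev_is_list = prev_line.strip().startswith('- ') or prev_line.strip().startswith('* ')
--         prev_is_empty = prev_line.strip() == ""
--         prev_is_header = prev_line.startswith('#')
--
--         # Check if next line exists and is not a list item
--         next_line = lines[i + 1] if i < len(lines) - 1 else ""
--         next_is_list = next_line.strip().startswith('- ') or next_line.strip().startswith('* ')
--         next_is_empty = next_line.strip() == ""
--         next_is_header = next_line.startswith('#')
--
--         # MD032: Add blank line before list if needed
--         if is_list_item and not prev_is_list and not prev_is_empty and not prev_is_header and prev_line.strip() != "":
--             cleaned_lines.append("")
--
--         # Add the current line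
--         cleaned_lines.append(line)
--
--         # MD032: Add blank line after list if needed
--         if is_list_item and not next_is_list and not next_is_empty and not next_is_header and next_line.strip() != "":
--             cleaned_lines.append("")
--
--     # MD012: Remove multiple consecutive blank lines
--     final_lines = []
--     consecutive_blanks = 0
--
--     for line in cleaned_lines:
--         if line.strip() == '':
--             consecutive_blanks += 1
--             if consecutive_blanks <= 1:  # Allow only one blank line
--                 final_lines.append(line)
--         else:
--             consecutive_blanks = 0
--             final_lines.append(line)
--
--     return '\n'.join(final_lines)
-- ===== SOURCE B (Python) =====
-- def _is_list_item(line):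
--     s = line.strip()
--     return s.startswith('- ') or s.startswith('* ')
--
--
-- def _needs_blank(line, neighbor):
--     return (_is_list_item(line) and not _is_list_item(neighbor)
--             and neighbor.strip() != "" and not neighbor.startswith('#'))
--
--
-- def _clean_markdown_spacing(content: str) -> str:
--     """Single fused pass: insert MD032 blanks around lists and collapse
--     consecutive blanks (MD012) while emitting, tracking one boolean."""
--     lines = content.split('\n')
--     n = len(lines)
--     out = []
--     last_blank = False
--     for i, line in enumerate(lines):
--         if _needs_blank(line, lines[i - 1] if i > 0 else ""):
--             if not last_blank:
--                 out.append("")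
--             last_blank = True
--         if line.strip() == "":
--             if not last_blank:
--                 out.append(line)
--             last_blank = True
--         else:
--             out.append(line)
--             last_blank = False
--         if _needs_blank(line, lines[i + 1] if i < n - 1 else ""):
--             if not last_blank:
--                 out.append("")
--             last_blank = True
--     return '\n'.join(out)
-- ===== Notes on version B (the rewrite author's own statement) =====
-- stated objective: alternative
-- what changed: Fuses A's two passes (build an intermediate list with MD032 blanks inserted, then a second pass collapsing consecutive blanks) into one pass over the original lines tracking a single boolean flag for blank-line adjacency, so no intermediate list is built; the neighbour condition is factored into one helper used for both directions.
import Mathlib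
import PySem

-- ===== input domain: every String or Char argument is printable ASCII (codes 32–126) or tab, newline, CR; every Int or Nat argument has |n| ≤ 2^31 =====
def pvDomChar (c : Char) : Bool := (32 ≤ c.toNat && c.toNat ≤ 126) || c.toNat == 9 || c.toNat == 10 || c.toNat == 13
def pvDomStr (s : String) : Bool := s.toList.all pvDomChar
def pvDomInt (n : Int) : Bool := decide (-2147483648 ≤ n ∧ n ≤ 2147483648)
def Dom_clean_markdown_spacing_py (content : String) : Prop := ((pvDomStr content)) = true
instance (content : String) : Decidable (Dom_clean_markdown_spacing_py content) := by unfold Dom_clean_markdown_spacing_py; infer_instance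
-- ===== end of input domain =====

-- B fuses A's two passes (insert MD032 blanks, then collapse consecutive blanks) into one
-- pass with a blank-adjacency flag; equivalence of return values is proved (alternative decomposition).


-- ===== PORT A =====
-- pass 1 of A: walk enumerate(lines), inserting blank lines around list items (MD032)
def pvLoop1 (lines : List String) : List (Int × String) → List String
  | [] => []
  | (i, line) :: rest =>
    let is_list_item := PySem.Str.startswith (PySem.Str.strip line) "- " ||
                        PySem.Str.startswith (PySem.Str.strip line) "* "
    let prev_line := if 0 < i then PySem.List.pyGetD lines (i - 1) "" else ""
    let prev_is_list := PySem.Str.startswith (PySem.Str.strip prev_line) "- " ||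
                        PySem.Str.startswith (PySem.Str.strip prev_line) "* "
    let prev_is_empty := PySem.Str.strip prev_line == ""
    let prev_is_header := PySem.Str.startswith prev_line "#"
    let next_line := if i < (PySem.List.len lines : Int) - 1 then PySem.List.pyGetD lines (i + 1) "" else ""
    let next_is_list := PySem.Str.startswith (PySem.Str.strip next_line) "- " ||
                        PySem.Str.startswith (PySem.Str.strip next_line) "* "
    let next_is_empty := PySem.Str.strip next_line == ""
    let next_is_header := PySem.Str.startswith next_line "#"
    (if is_list_item && !prev_is_list && !prev_is_empty && !prev_is_header &&
        !(PySem.Str.strip prev_line == "") then [""] else []) ++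
    line ::
    ((if is_list_item && !next_is_list && !next_is_empty && !next_is_header &&
        !(PySem.Str.strip next_line == "") then [""] else []) ++
     pvLoop1 lines rest)

-- pass 2 of A: remove consecutive blank lines (MD012), counting consecutive blanks
def pvLoop2 : Int → List String → List String
  | _, [] => []
  | consecutive_blanks, line :: rest =>
    if PySem.Str.strip line == "" then
      (if consecutive_blanks + 1 ≤ 1 then [line] else []) ++ pvLoop2 (consecutive_blanks + 1) rest
    else
      line :: pvLoop2 0 rest

def clean_markdown_spacing_py (content : String) : String :=
  let lines := (PySem.Str.split? content "\n").getD []  -- split? is some: sep "\n" ≠ ""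
  PySem.Str.join "\n" (pvLoop2 0 (pvLoop1 lines (PySem.List.enumerate lines 0)))

-- ===== PORT B =====
def pvIsListItem (line : String) : Bool :=
  PySem.Str.startswith (PySem.Str.strip line) "- " || PySem.Str.startswith (PySem.Str.strip line) "* "

def pvNeedsBlank (line neighbor : String) : Bool :=
  pvIsListItem line && !pvIsListItem neighbor &&
  !(PySem.Str.strip neighbor == "") && !PySem.Str.startswith neighbor "#"

-- B's single fused pass: emit lines, tracking whether the last emitted line was blank
def pvLoopB (lines : List String) : Bool → List (Int × String) → List String
  | _, [] => []
  | last_blank, (i, line) :: rest =>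
    let p1 : List String × Bool :=
      if pvNeedsBlank line (if 0 < i then PySem.List.pyGetD lines (i - 1) "" else "") then
        ((if last_blank then [] else [""]), true)
      else ([], last_blank)
    let p2 : List String × Bool :=
      if PySem.Str.strip line == "" then ((if p1.2 then [] else [line]), true)
      else ([line], false)
    let p3 : List String × Bool :=
      if pvNeedsBlank line (if i < (PySem.List.len lines : Int) - 1 then PySem.List.pyGetD lines (i + 1) "" else "") then
        ((if p2.2 then [] else [""]), true)
      else ([], p2.2)
    p1.1 ++ p2.1 ++ p3.1 ++ pvLoopB lines p3.2 rest

def clean_markdown_spacing_py_alt (content : String) : String :=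
  let lines := (PySem.Str.split? content "\n").getD []  -- split? is some: sep "\n" ≠ ""
  PySem.Str.join "\n" (pvLoopB lines false (PySem.List.enumerate lines 0))

-- ===== PRECONDITION & SPEC =====
def Spec_clean_markdown_spacing_py (content : String) (out : String) : Prop := out = clean_markdown_spacing_py_alt content
instance (content : String) (out : String) : Decidable (Spec_clean_markdown_spacing_py content out) := by unfold Spec_clean_markdown_spacing_py; infer_instance

-- ===== CLAIM (what is proved, stated in full; the proofs are below) =====
def Claim_equal_clean_markdown_spacing_py : Prop := ∀ (content : String), Dom_clean_markdown_spacing_py content → Spec_clean_markdown_spacing_py content (clean_markdown_spacing_py content)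

-- ===== LEMMAS AND PROOFS =====

-- boolean-state version of A's pass 2 (the flag says: previous line was blank)
def pvCollapse : Bool → List String → List String
  | _, [] => []
  | b, line :: rest =>
    if PySem.Str.strip line == "" then
      (if b then [] else [line]) ++ pvCollapse true rest
    else
      line :: pvCollapse false rest

lemma pvLoop2_eq_collapse (ls : List String) : ∀ cb : Int, 0 ≤ cb →
    pvLoop2 cb ls = pvCollapse (decide (1 ≤ cb)) ls := by
  induction ls with
  | nil => intro cb _; rfl
  | cons l rest ih =>
    intro cb hcb
    simp only [pvLoop2, pvCollapse]
    by_cases hs : (PySem.Str.strip l == "") = true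
    · rw [if_pos hs, if_pos hs, ih (cb + 1) (by omega)]
      by_cases hb : (1 : Int) ≤ cb
      · have h1 : ¬ (cb + 1 ≤ 1) := by omega
        have h2 : (1 : Int) ≤ cb + 1 := by omega
        simp [h1, h2, hb]
      · have h1 : cb + 1 ≤ 1 := by omega
        have h2 : (1 : Int) ≤ cb + 1 := by omega
        simp [h1, h2, hb]
    · rw [if_neg hs, if_neg hs, ih 0 (by omega)]
      norm_num

lemma pvCond_eq (a b e h : Bool) : (a && !b && !e && !h && !e) = (a && !b && !e && !h) := by
  revert a b e h; decide

-- one fused step of B equals collapsing one chunk of A's pass-1 output, abstractly in the two conditions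
lemma pvStep (c1 c2 lb : Bool) (line : String) (tb : Bool → List String) (xs : List String)
    (htail : ∀ b, tb b = pvCollapse b xs) :
    (let p1 : List String × Bool := if c1 then ((if lb then [] else [""]), true) else ([], lb)
     let p2 : List String × Bool := if PySem.Str.strip line == "" then ((if p1.2 then [] else [line]), true) else ([line], false)
     let p3 : List String × Bool := if c2 then ((if p2.2 then [] else [""]), true) else ([], p2.2)
     p1.1 ++ p2.1 ++ p3.1 ++ tb p3.2) =
    pvCollapse lb ((if c1 then [""] else []) ++ line :: ((if c2 then [""] else []) ++ xs)) := by
  have h0 : (PySem.Str.strip "" == "") = true := by decide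
  cases c1 <;> cases c2 <;> cases lb <;>
    by_cases hs : (PySem.Str.strip line == "") = true <;>
    simp [hs, h0, htail, pvCollapse]

lemma pvLoopB_eq_collapse (lines : List String) (il : List (Int × String)) :
    ∀ lb : Bool, pvLoopB lines lb il = pvCollapse lb (pvLoop1 lines il) := by
  induction il with
  | nil => intro lb; rfl
  | cons p rest ih =>
    intro lb
    obtain ⟨i, line⟩ := p
    simp only [pvLoop1, pvLoopB, pvNeedsBlank, pvIsListItem]
    rw [pvCond_eq, pvCond_eq]
    exact pvStep _ _ lb line (fun b => pvLoopB lines b rest) (pvLoop1 lines rest) ih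

-- ===== VERDICT (by name: the statement is the Claim_ definition above) =====
theorem clean_markdown_spacing_py_spec : Claim_equal_clean_markdown_spacing_py := by
  intro content _
  unfold Spec_clean_markdown_spacing_py
  simp only [clean_markdown_spacing_py, clean_markdown_spacing_py_alt]
  rw [pvLoop2_eq_collapse _ 0 (by omega), pvLoopB_eq_collapse]
  norm_num
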